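-- pv_equiv track=rewrite | github.com/angm-hub/leopardsradar | scripts/_work/generate_revue_html.py | classify_auto
-- ===== SOURCE A (Python) =====
-- def classify_auto(players):
--     """Sépare les joueurs en 3 groupes :
--        - auto_confirm : caps_rdc > 0 (Léopards A existants ou passés)
--        - auto_locked  : caps_other_count > 3 (FIFA Art 9 — verrouillés autre nation)
--        - to_review    : reste (à arbitrer manuellement)
--     """
--     auto_confirm = []
--     auto_locked = []
--     to_review = []
--     for p in players:
--         caps_rdc = p.get("caps_rdc") or 0
--         caps_other = p.get("caps_other_count") or 0
--         if caps_rdc > 0: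
--             auto_confirm.append(p)
--         elif caps_other > 3:
--             auto_locked.append(p)
--         else:
--             to_review.append(p)
--     return auto_confirm, auto_locked, to_review
-- ===== SOURCE B (Python) =====
-- def classify_auto(players):
--     """Sépare les joueurs en 3 groupes via trois balayages filtrés."""
--     def confirmed(p):
--         return (p.get("caps_rdc") or 0) > 0
--
--     def locked(p):
--         return (p.get("caps_other_count") or 0) > 3
--
--     auto_confirm = [p for p in players if confirmed(p)]
--     auto_locked = [p for p in players if not confirmed(p) and locked(p)]
--     to_review = [p for p in players if not confirmed(p) and not locked(p)]
--     return auto_confirm, auto_locked, to_review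
-- ===== Notes on version B (the rewrite author's own statement) =====
-- stated objective: alternative
-- what changed: Replaced the single classifying loop with three accumulators by three independent filtered comprehensions (one scan per output group) with named predicates.
import Mathlib
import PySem

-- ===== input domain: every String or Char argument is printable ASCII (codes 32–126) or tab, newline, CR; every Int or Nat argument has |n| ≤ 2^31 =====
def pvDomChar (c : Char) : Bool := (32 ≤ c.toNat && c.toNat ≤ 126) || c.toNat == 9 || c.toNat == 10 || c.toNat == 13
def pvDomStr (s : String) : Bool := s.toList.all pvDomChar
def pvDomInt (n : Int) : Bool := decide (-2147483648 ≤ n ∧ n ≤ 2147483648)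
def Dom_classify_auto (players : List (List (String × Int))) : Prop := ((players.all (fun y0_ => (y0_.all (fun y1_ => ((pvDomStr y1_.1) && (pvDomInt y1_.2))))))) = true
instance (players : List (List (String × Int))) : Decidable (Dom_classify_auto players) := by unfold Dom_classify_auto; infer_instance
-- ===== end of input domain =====

-- B replaces A's single classifying loop by three independent filtered scans (alternative decomposition, same cost class).


-- ===== PORT A =====
-- `p.get(k) or 0`: None → 0, 0 → 0 (falsy), otherwise the value itself
def pvGetOr0 (p : List (String × Int)) (k : String) : Int :=
  match (PySem.Dict.mk p).get? k with
  | none => 0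
  | some v => if v = 0 then 0 else v

def classify_auto (players : List (List (String × Int))) : (List (List (String × Int))) × (List (List (String × Int))) × (List (List (String × Int))) :=
  let r := players.foldl (fun (acc : (List (List (String × Int))) × (List (List (String × Int))) × (List (List (String × Int)))) p =>
    let caps_rdc := pvGetOr0 p "caps_rdc"
    let caps_other := pvGetOr0 p "caps_other_count"
    if caps_rdc > 0 then (acc.1 ++ [p], acc.2.1, acc.2.2)
    else if caps_other > 3 then (acc.1, acc.2.1 ++ [p], acc.2.2)
    else (acc.1, acc.2.1, acc.2.2 ++ [p])) ([], [], [])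
  r

-- ===== PORT B =====
def pvConfirmed (p : List (String × Int)) : Bool :=
  decide (pvGetOr0 p "caps_rdc" > 0)

def pvLocked (p : List (String × Int)) : Bool :=
  decide (pvGetOr0 p "caps_other_count" > 3)

def classify_auto_alt (players : List (List (String × Int))) : (List (List (String × Int))) × (List (List (String × Int))) × (List (List (String × Int))) :=
  (players.filter (fun p => pvConfirmed p),
   players.filter (fun p => !pvConfirmed p && pvLocked p),
   players.filter (fun p => !pvConfirmed p && !pvLocked p))

-- ===== PRECONDITION & SPEC =====
def Spec_classify_auto (players : List (List (String × Int))) (out : (List (List (String × Int))) × (List (List (String × Int))) × (List (List (String × Int)))) : Prop := out = classify_auto_alt players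
instance (players : List (List (String × Int))) (out : (List (List (String × Int))) × (List (List (String × Int))) × (List (List (String × Int)))) : Decidable (Spec_classify_auto players out) := by unfold Spec_classify_auto; infer_instance

-- ===== CLAIM (what is proved, stated in full; the proofs are below) =====
def Claim_equal_classify_auto : Prop := ∀ (players : List (List (String × Int))), Dom_classify_auto players → Spec_classify_auto players (classify_auto players)

-- ===== LEMMAS AND PROOFS =====

-- loop invariant: the fold with arbitrary accumulators equals the accumulators extended by the three filters
lemma classify_fold_inv (players : List (List (String × Int)))
    (ac al tr : List (List (String × Int))) :
    players.foldl (fun (acc : (List (List (String × Int))) × (List (List (String × Int))) × (List (List (String × Int)))) p =>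
      let caps_rdc := pvGetOr0 p "caps_rdc"
      let caps_other := pvGetOr0 p "caps_other_count"
      if caps_rdc > 0 then (acc.1 ++ [p], acc.2.1, acc.2.2)
      else if caps_other > 3 then (acc.1, acc.2.1 ++ [p], acc.2.2)
      else (acc.1, acc.2.1, acc.2.2 ++ [p])) (ac, al, tr)
    = (ac ++ players.filter (fun p => pvConfirmed p),
       al ++ players.filter (fun p => !pvConfirmed p && pvLocked p),
       tr ++ players.filter (fun p => !pvConfirmed p && !pvLocked p)) := by
  induction players generalizing ac al tr with
  | nil => simp
  | cons p ps ih =>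
    simp only [List.foldl_cons, List.filter_cons]
    by_cases h1 : pvGetOr0 p "caps_rdc" > 0
    · simp only [ih, pvConfirmed, h1, decide_true]
      simp
    · by_cases h2 : pvGetOr0 p "caps_other_count" > 3
      · simp only [ih, pvConfirmed, pvLocked, h1, h2,
          decide_false, decide_true]
        simp
      · simp only [ih, pvConfirmed, pvLocked, h1, h2, decide_false]
        simp

-- ===== VERDICT (by name: the statement is the Claim_ definition above) =====
theorem classify_auto_spec : Claim_equal_classify_auto := by
  intro players _
  unfold Spec_classify_auto classify_auto classify_auto_alt
  simpa using classify_fold_inv players [] [] []
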